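-- pv_equiv track=rewrite | github.com/euclidr/k8s-config-cheatsheet | definition_page/dpage/logic/resource.py | _extract_col_widths
-- ===== SOURCE A (Python) =====
-- from typing import List, Optional
--
-- def _extract_col_widths(head: str) -> List[int]:
--     '''get column width except for the last column'''
--     pre_blank, pre_idx = False, 0
--     result = []
--     for i, c in enumerate(head):
--         if pre_blank and c != ' ':
--             result.append(i-pre_idx)
--             pre_idx = i
--         pre_blank = c == ' '
--     return result
-- ===== SOURCE B (Python) =====
-- from typing import List
--
--
-- def _extract_col_widths(head: str) -> List[int]:
--     '''get column width except for the last column'''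
--     def go(s: str) -> List[int]:
--         # s starts at a column boundary; consume one nonspace run, then
--         # one space run; if anything remains, that distance is a width
--         i = 0
--         while i < len(s) and s[i] != ' ':
--             i += 1
--         while i < len(s) and s[i] == ' ':
--             i += 1
--         if i == len(s):
--             return []
--         return [i] + go(s[i:])
--     return go(head)
-- ===== Notes on version B (the rewrite author's own statement) =====
-- stated objective: alternative
-- what changed: B is a recursive run-consumer: it repeatedly strips one nonspace run and one space run off the front of the string, emitting the consumed length as a column width whenever characters remain, instead of A's single indexed scan carrying a previous-blank flag and a running anchor.
import Mathlib
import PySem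

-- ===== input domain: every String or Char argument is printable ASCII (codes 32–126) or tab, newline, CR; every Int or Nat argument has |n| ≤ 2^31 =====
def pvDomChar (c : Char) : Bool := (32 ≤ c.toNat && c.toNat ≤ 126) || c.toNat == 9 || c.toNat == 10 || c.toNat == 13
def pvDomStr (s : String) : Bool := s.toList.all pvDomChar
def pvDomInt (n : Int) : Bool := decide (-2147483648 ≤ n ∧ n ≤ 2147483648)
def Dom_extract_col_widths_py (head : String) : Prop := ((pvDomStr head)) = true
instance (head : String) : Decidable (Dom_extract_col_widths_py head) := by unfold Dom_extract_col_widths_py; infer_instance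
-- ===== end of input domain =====

-- B recursively consumes one nonspace run then one space run per column and emits the
-- consumed length as the width; A scans once with a flag and a running anchor.
-- Same cost, different decomposition (recursion on run structure vs stateful scan).

-- ===== PORT A =====
-- one loop step of A: state (pre_blank, pre_idx, result), input (i, c)
def pvStepA (st : Bool × Int × List Int) (p : Int × Char) : Bool × Int × List Int :=
  let pre_blank := st.1
  let pre_idx := st.2.1
  let result := st.2.2
  let (pre_idx', result') :=
    if pre_blank && p.2 != ' ' then (p.1, result ++ [p.1 - pre_idx])
    else (pre_idx, result)
  (p.2 == ' ', pre_idx', result')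

def extract_col_widths_py (head : String) : List Int :=
  ((PySem.List.enumerate head.toList 0).foldl pvStepA (false, 0, [])).2.2

-- ===== PORT B =====
-- the two index-advancing while loops of Source B compute exactly
-- dropWhile (· != ' ') then dropWhile (· == ' '), with i = cs.length - r2.length (exact)
-- termination helper for pvGo: each recursive call strictly shrinks the list
-- termination helper for pvGo: each recursive call strictly shrinks the list
theorem pvGo_dec (cs : List Char)
    (h : ((cs.dropWhile (fun c => c != ' ')).dropWhile (fun c => c == ' ')) ≠ []) :
    ((cs.dropWhile (fun c => c != ' ')).dropWhile (fun c => c == ' ')).length < cs.length := by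
  cases cs with
  | nil => simp at h
  | cons c cs' =>
    by_cases hc : (c != ' ') = true
    · have e1 : (c :: cs').dropWhile (fun x => x != ' ') = cs'.dropWhile (fun x => x != ' ') := by
        rw [List.dropWhile_cons, if_pos hc]
      rw [e1]
      exact Nat.lt_succ_of_le (Nat.le_trans (List.length_dropWhile_le _ _) (List.length_dropWhile_le _ _))
    · have hceq : (c == ' ') = true := by simpa using hc
      have e1 : (c :: cs').dropWhile (fun x => x != ' ') = c :: cs' := by
        rw [List.dropWhile_cons, if_neg hc]
      have e2 : (c :: cs').dropWhile (fun x => x == ' ') = cs'.dropWhile (fun x => x == ' ') := by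
        rw [List.dropWhile_cons, if_pos hceq]
      rw [e1, e2]
      exact Nat.lt_succ_of_le (List.length_dropWhile_le _ _)

def pvGo (cs : List Char) : List Int :=
  let r1 := cs.dropWhile (fun c => c != ' ')
  let r2 := r1.dropWhile (fun c => c == ' ')
  if r2.isEmpty then []
  else ((cs.length - r2.length : Nat) : Int) :: pvGo r2
termination_by cs.length
decreasing_by
  rename_i h
  refine pvGo_dec cs ?_
  intro he
  apply h
  have e : r2 = [] := he
  rw [e, List.isEmpty_nil]

def extract_col_widths_py_alt (head : String) : List Int :=
  pvGo head.toList

-- ===== PRECONDITION & SPEC =====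
def Spec_extract_col_widths_py (head : String) (out : List Int) : Prop := out = extract_col_widths_py_alt head
instance (head : String) (out : List Int) : Decidable (Spec_extract_col_widths_py head out) := by unfold Spec_extract_col_widths_py; infer_instance

-- ===== CLAIM (what is proved, stated in full; the proofs are below) =====
def Claim_equal_extract_col_widths_py : Prop := ∀ (head : String), Dom_extract_col_widths_py head → Spec_extract_col_widths_py head (extract_col_widths_py head)

-- ===== LEMMAS AND PROOFS =====

-- reference recursion: A's loop over the remaining chars, at index i, with flag pb and anchor a
def pvRef (cs : List Char) (i : Int) (pb : Bool) (a : Int) : List Int :=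
  match cs with
  | [] => []
  | c :: rest =>
    if pb && c != ' ' then (i - a) :: pvRef rest (i + 1) (c == ' ') i
    else pvRef rest (i + 1) (c == ' ') a

theorem pvA_foldl (cs : List Char) : ∀ (i : Int) (pb : Bool) (a : Int) (r : List Int),
    ((PySem.List.enumerate cs i).foldl pvStepA (pb, a, r)).2.2 = r ++ pvRef cs i pb a := by
  induction cs with
  | nil => intro i pb a r; simp [PySem.List.enumerate_nil, pvRef]
  | cons c rest ih =>
    intro i pb a r
    rw [PySem.List.enumerate_cons]
    by_cases h : pb && c != ' '
    · simp [List.foldl_cons, pvStepA, pvRef, h, ih]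
    · simp [List.foldl_cons, pvStepA, pvRef, h, ih]

-- skipping a nonspace run with flag false records nothing and keeps the flag false
theorem pvRef_skip_nonspace (t : List Char) : ∀ (r : List Char) (i a : Int),
    (∀ c ∈ t, c ≠ ' ') → pvRef (t ++ r) i false a = pvRef r (i + t.length) false a := by
  induction t with
  | nil => intro r i a _; simp
  | cons c t' ih =>
    intro r i a h
    have hc : c ≠ ' ' := h c (by simp)
    have hcb : (c == ' ') = false := by simpa using hc
    have hlen : i + 1 + (t'.length : Int) = i + ((c :: t').length : Nat) := by
      simp only [List.length_cons]
      push_cast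
      ring
    simp only [List.cons_append, pvRef, Bool.false_and, Bool.false_eq_true, if_false, hcb]
    rw [ih r (i + 1) a (fun d hd => h d (by simp [hd])), hlen]

-- skipping a nonempty space run records nothing and sets the flag
theorem pvRef_skip_space (t : List Char) : ∀ (r : List Char) (i a : Int) (pb : Bool),
    (∀ c ∈ t, c = ' ') → t ≠ [] → pvRef (t ++ r) i pb a = pvRef r (i + t.length) true a := by
  induction t with
  | nil => intro _ _ _ _ _ h; exact absurd rfl h
  | cons c t' ih =>
    intro r i a pb h _
    have hc : c = ' ' := h c (by simp)
    subst hc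
    simp only [List.cons_append, pvRef, bne_self_eq_false, Bool.and_false,
      Bool.false_eq_true, if_false, beq_self_eq_true]
    cases t' with
    | nil =>
      simp only [List.nil_append, List.length_cons, List.length_nil]
      norm_num
    | cons d t'' =>
      have hlen : i + 1 + ((d :: t'').length : Int) = i + (((' ' : Char) :: d :: t'').length : Nat) := by
        simp only [List.length_cons]
        push_cast
        ring
      rw [ih r (i + 1) a true (fun e he => h e (by simp [he])) (by simp), hlen]

-- if the flag is false and the list is all spaces after dropping, the rest records nothing
theorem pvRef_all_space (t : List Char) : ∀ (i a : Int) (pb : Bool),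
    (∀ c ∈ t, c = ' ') → pvRef t i pb a = [] := by
  induction t with
  | nil => intro _ _ _ _; simp [pvRef]
  | cons c t' ih =>
    intro i a pb h
    have hc : c = ' ' := h c (by simp)
    subst hc
    simp only [pvRef, bne_self_eq_false, Bool.and_false, Bool.false_eq_true, if_false]
    exact ih _ _ _ (fun e he => h e (by simp [he]))

-- main invariant: from a column start (anchor = current index, flag false),
-- A's remaining records are exactly pvGo of the remaining chars
-- one-step unfolding of pvGo
theorem pvGo_eq (cs : List Char) :
    pvGo cs =
      if ((cs.dropWhile (fun c => c != ' ')).dropWhile (fun c => c == ' ')).isEmpty then []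
      else ((cs.length - ((cs.dropWhile (fun c => c != ' ')).dropWhile (fun c => c == ' ')).length : Nat) : Int)
        :: pvGo ((cs.dropWhile (fun c => c != ' ')).dropWhile (fun c => c == ' ')) := by
  rw [pvGo.eq_def]

theorem pvRef_eq_pvGo (cs : List Char) : ∀ (i : Int), pvRef cs i false i = pvGo cs := by
  induction hn : cs.length using Nat.strong_induction_on generalizing cs with
  | _ n ih =>
  intro i
  rw [pvGo_eq]
  set t1 := cs.takeWhile (fun c => c != ' ') with ht1
  set r1 := cs.dropWhile (fun c => c != ' ') with hr1
  set t2 := r1.takeWhile (fun c => c == ' ') with ht2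
  set r2 := r1.dropWhile (fun c => c == ' ') with hr2
  have hcs : t1 ++ r1 = cs := List.takeWhile_append_dropWhile
  have hr1s : t2 ++ r2 = r1 := List.takeWhile_append_dropWhile
  have ht1ns : ∀ c ∈ t1, c ≠ ' ' := by
    intro c hc
    have := List.mem_takeWhile_imp hc
    simpa using this
  have ht2s : ∀ c ∈ t2, c = ' ' := by
    intro c hc
    have := List.mem_takeWhile_imp hc
    simpa using this
  by_cases hr2e : r2 = []
  · -- no further boundary: A records nothing from here
    rw [hr2e]
    simp only [List.isEmpty_nil, if_true]
    rw [← hcs, pvRef_skip_nonspace t1 r1 i i ht1ns]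
    rw [← hr1s, hr2e, List.append_nil]
    exact pvRef_all_space t2 _ _ _ ht2s
  · have hr2ne : r2.isEmpty = false := by simp [hr2e]
    rw [hr2ne]
    simp only [Bool.false_eq_true, if_false]
    -- the space run before r2 is nonempty
    have ht2ne : t2 ≠ [] := by
      intro ht2e
      have hr1r2 : r1 = r2 := by rw [← hr1s, ht2e, List.nil_append]
      cases hr2c : r2 with
      | nil => exact hr2e hr2c
      | cons c rest =>
        have h1 : ¬ ((fun c => c != ' ') c = true) := by
          have : r1 ≠ [] := by rw [hr1r2, hr2c]; simp
          have := List.head_dropWhile_not (p := fun c => c != ' ') (l := cs) (by rw [← hr1]; exact this)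
          simpa [← hr1, hr1r2, hr2c] using this
        have h2 : ¬ ((fun c => c == ' ') c = true) := by
          have : r1.dropWhile (fun c => c == ' ') ≠ [] := by rw [← hr2]; exact hr2e
          have := List.head_dropWhile_not (p := fun c => c == ' ') (l := r1) this
          simpa [← hr2, hr2c] using this
        simp at h1 h2
        exact h2 h1
    -- head of r2 is nonspace
    obtain ⟨c, rest, hr2c⟩ := List.exists_cons_of_ne_nil hr2e
    have hcns : c ≠ ' ' := by
      have : r1.dropWhile (fun c => c == ' ') ≠ [] := by rw [← hr2]; exact hr2e
      have := List.head_dropWhile_not (p := fun c => c == ' ') (l := r1) this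
      simpa [← hr2, hr2c] using this
    rw [← hcs, pvRef_skip_nonspace t1 r1 i i ht1ns,
        ← hr1s, pvRef_skip_space t2 r2 (i + t1.length) i false ht2s ht2ne]
    rw [hr2c]
    simp only [pvRef, Bool.true_and]
    rw [show (c != ' ') = true by simpa using hcns]
    simp only [if_true]
    rw [show (c == ' ') = false by simpa using hcns]
    have hih : pvRef (c :: rest) (i + t1.length + t2.length) false (i + t1.length + t2.length)
        = pvGo r2 := by
      rw [← hr2c]
      apply ih r2.length _ r2 rfl
      subst hn
      rw [← hcs, ← hr1s]
      simp only [List.length_append]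
      have : t2.length ≠ 0 := by simpa using ht2ne
      omega
    rw [show pvRef (c :: rest) (i + t1.length + t2.length) false (i + t1.length + t2.length)
          = if (false : Bool) && (c != ' ') then ((i + t1.length + t2.length) - (i + t1.length + t2.length)) :: pvRef rest (i + t1.length + t2.length + 1) (c == ' ') (i + t1.length + t2.length)
            else pvRef rest (i + t1.length + t2.length + 1) (c == ' ') (i + t1.length + t2.length) from rfl] at hih
    rw [show (c == ' ') = false by simpa using hcns] at hih
    simp only [Bool.false_and, Bool.false_eq_true, if_false] at hih
    congr 1
    · -- recorded width = consumed length
      simp only [List.length_append, List.length_cons]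
      omega
    · rw [hih, hr2c]

-- ===== VERDICT (by name: the statement is the Claim_ definition above) =====
theorem extract_col_widths_py_spec : Claim_equal_extract_col_widths_py := by
  intro head _
  unfold Spec_extract_col_widths_py extract_col_widths_py extract_col_widths_py_alt
  rw [pvA_foldl]
  simpa using pvRef_eq_pvGo head.toList 0
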